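-- pv_equiv track=rewrite | github.com/TQRG/security-patches-dataset | tools/nvd/cli.py | get_refs
-- ===== SOURCE A (Python) =====
-- def get_refs(refs):
--     cve_refs = []
--     for ref in refs:
--         if 'commit/' in ref or 'commits/' in ref:
--             cve_refs.append({'type': 'FIX', 'url': ref})
--         elif 'issue' in ref or 'issues' in ref or 'show_bug' in ref or \
--             'bugs.debian.org/' in ref or 'bugs.gentoo.org/' in ref or \
--             'syzkaller.appspot.com/bug?' in ref or 'savannah.gnu.org/bugs' in ref or \
--             'bugs.launchpad.net' in ref or 'hackerone.com/bugs' in ref or\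
--             'hackerone.com/bugs' in ref:
--             cve_refs.append({'type': 'REPORT', 'url': ref})
--         elif 'advisory' in ref or 'advisories' in ref or 'www.debian.org/security/' in ref:
--             cve_refs.append({'type': 'ADVISORY', 'url': ref})
--         elif 'arxiv.org' in ref:
--             cve_refs.append({'type': 'ARTICLE', 'url': ref})
--         else:
--             cve_refs.append({'type': 'WEB', 'url': ref})
--     return cve_refs
-- ===== SOURCE B (Python) =====
-- RULES = [
--     ('FIX', ['commit/', 'commits/']),
--     ('REPORT', ['issue', 'issues', 'show_bug', 'bugs.debian.org/',
--                 'bugs.gentoo.org/', 'syzkaller.appspot.com/bug?',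
--                 'savannah.gnu.org/bugs', 'bugs.launchpad.net',
--                 'hackerone.com/bugs', 'hackerone.com/bugs']),
--     ('ADVISORY', ['advisory', 'advisories', 'www.debian.org/security/']),
--     ('ARTICLE', ['arxiv.org']),
-- ]
--
--
-- def get_refs(refs):
--     # Stage 1: tag everything WEB.
--     out = [{'type': 'WEB', 'url': ref} for ref in refs]
--     # Stage 2: one overwrite pass per rule, lowest precedence first,
--     # so the highest-precedence matching rule wins by overwriting last.
--     for rtype, subs in reversed(RULES):
--         for entry in out:
--             if any(s in entry['url'] for s in subs):
--                 entry['type'] = rtype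
--     return out
-- ===== Notes on version B (the rewrite author's own statement) =====
-- stated objective: alternative
-- what changed: Replaces the single-pass per-element elif chain with staged passes: first a default pass tagging every ref WEB, then one full overwrite pass per rule in reverse precedence order, so the highest-precedence matching rule wins by overwriting last instead of by first-match branching.
import Mathlib
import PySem

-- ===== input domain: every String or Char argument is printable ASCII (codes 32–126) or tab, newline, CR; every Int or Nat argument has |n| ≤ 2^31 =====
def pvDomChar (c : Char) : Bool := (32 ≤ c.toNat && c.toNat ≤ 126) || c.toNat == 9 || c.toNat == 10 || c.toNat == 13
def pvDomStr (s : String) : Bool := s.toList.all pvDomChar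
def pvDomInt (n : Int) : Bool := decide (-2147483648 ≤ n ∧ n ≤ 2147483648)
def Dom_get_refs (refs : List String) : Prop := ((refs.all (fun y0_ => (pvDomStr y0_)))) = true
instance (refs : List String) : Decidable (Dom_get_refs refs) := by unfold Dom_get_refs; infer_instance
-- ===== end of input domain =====

-- B replaces A's single-pass elif chain by staged overwrite passes (default WEB, then one
-- pass per rule in reverse precedence order); alternative decomposition, same cost.

-- ===== PORT A =====
def get_refs (refs : List String) : List (List (String × String)) :=
  refs.foldl (fun cve_refs ref =>
    if PySem.Str.isIn "commit/" ref || PySem.Str.isIn "commits/" ref then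
      cve_refs ++ [[("type", "FIX"), ("url", ref)]]
    else if PySem.Str.isIn "issue" ref || PySem.Str.isIn "issues" ref || PySem.Str.isIn "show_bug" ref ||
            PySem.Str.isIn "bugs.debian.org/" ref || PySem.Str.isIn "bugs.gentoo.org/" ref ||
            PySem.Str.isIn "syzkaller.appspot.com/bug?" ref || PySem.Str.isIn "savannah.gnu.org/bugs" ref ||
            PySem.Str.isIn "bugs.launchpad.net" ref || PySem.Str.isIn "hackerone.com/bugs" ref ||
            PySem.Str.isIn "hackerone.com/bugs" ref then
      cve_refs ++ [[("type", "REPORT"), ("url", ref)]]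
    else if PySem.Str.isIn "advisory" ref || PySem.Str.isIn "advisories" ref ||
            PySem.Str.isIn "www.debian.org/security/" ref then
      cve_refs ++ [[("type", "ADVISORY"), ("url", ref)]]
    else if PySem.Str.isIn "arxiv.org" ref then
      cve_refs ++ [[("type", "ARTICLE"), ("url", ref)]]
    else
      cve_refs ++ [[("type", "WEB"), ("url", ref)]]) []

-- ===== PORT B =====
def pvRules : List (String × List String) :=
  [("FIX", ["commit/", "commits/"]),
   ("REPORT", ["issue", "issues", "show_bug", "bugs.debian.org/",
               "bugs.gentoo.org/", "syzkaller.appspot.com/bug?",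
               "savannah.gnu.org/bugs", "bugs.launchpad.net",
               "hackerone.com/bugs", "hackerone.com/bugs"]),
   ("ADVISORY", ["advisory", "advisories", "www.debian.org/security/"]),
   ("ARTICLE", ["arxiv.org"])]

-- entry['url'] : first-match assoc lookup; exact here since every entry carries a "url" key
def pvGetUrl (entry : List (String × String)) : String :=
  ((entry.find? (fun p => p.1 == "url")).map Prod.snd).getD ""

-- entry['type'] = t : overwrite in place; exact here since every entry carries a "type" key
def pvSetType (entry : List (String × String)) (t : String) : List (String × String) :=
  entry.map (fun p => if p.1 == "type" then (p.1, t) else p)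

-- body of the inner overwrite pass: one rule applied to one entry
def pvStage (rule : String × List String) (entry : List (String × String)) : List (String × String) :=
  if rule.2.any (fun s => PySem.Str.isIn s (pvGetUrl entry)) then pvSetType entry rule.1
  else entry

def get_refs_alt (refs : List String) : List (List (String × String)) :=
  let out := refs.map (fun ref => [("type", "WEB"), ("url", ref)])
  pvRules.reverse.foldl (fun out rule => out.map (pvStage rule)) out

-- ===== PRECONDITION & SPEC =====
def Spec_get_refs (refs : List String) (out : List (List (String × String))) : Prop := out = get_refs_alt refs
instance (refs : List String) (out : List (List (String × String))) : Decidable (Spec_get_refs refs out) := by unfold Spec_get_refs; infer_instance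

-- ===== CLAIM (what is proved, stated in full; the proofs are below) =====
def Claim_equal_get_refs : Prop := ∀ (refs : List String), Dom_get_refs refs → Spec_get_refs refs (get_refs refs)

-- ===== LEMMAS AND PROOFS =====

-- B's per-element result after all four overwrite passes
def pvPoint (ref : String) : List (String × String) :=
  pvStage ("FIX", ["commit/", "commits/"])
    (pvStage ("REPORT", ["issue", "issues", "show_bug", "bugs.debian.org/",
               "bugs.gentoo.org/", "syzkaller.appspot.com/bug?",
               "savannah.gnu.org/bugs", "bugs.launchpad.net",
               "hackerone.com/bugs", "hackerone.com/bugs"])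
      (pvStage ("ADVISORY", ["advisory", "advisories", "www.debian.org/security/"])
        (pvStage ("ARTICLE", ["arxiv.org"])
          [("type", "WEB"), ("url", ref)])))

theorem pvGetUrl_pair (t u : String) : pvGetUrl [("type", t), ("url", u)] = u := rfl

theorem pvSetType_pair (t u t' : String) :
    pvSetType [("type", t), ("url", u)] t' = [("type", t'), ("url", u)] := rfl
theorem get_refs_alt_eq_map (refs : List String) :
    get_refs_alt refs = refs.map pvPoint := by
  simp only [get_refs_alt, pvRules, List.reverse, List.reverseAux, List.foldl,
    List.map_map]
  apply List.map_congr_left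
  intro x _
  simp only [Function.comp_apply]
  unfold pvPoint
  rfl
theorem pvStage_pair (rule : String × List String) (t u : String) :
    pvStage rule [("type", t), ("url", u)] =
      [("type", if rule.2.any (fun s => PySem.Str.isIn s u) then rule.1 else t), ("url", u)] := by
  simp only [pvStage, pvGetUrl_pair, pvSetType_pair]
  split_ifs <;> rfl

theorem get_refs_pointwise (ref : String) :
    (if PySem.Str.isIn "commit/" ref || PySem.Str.isIn "commits/" ref then
      [("type", "FIX"), ("url", ref)]
    else if PySem.Str.isIn "issue" ref || PySem.Str.isIn "issues" ref || PySem.Str.isIn "show_bug" ref ||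
            PySem.Str.isIn "bugs.debian.org/" ref || PySem.Str.isIn "bugs.gentoo.org/" ref ||
            PySem.Str.isIn "syzkaller.appspot.com/bug?" ref || PySem.Str.isIn "savannah.gnu.org/bugs" ref ||
            PySem.Str.isIn "bugs.launchpad.net" ref || PySem.Str.isIn "hackerone.com/bugs" ref ||
            PySem.Str.isIn "hackerone.com/bugs" ref then
      [("type", "REPORT"), ("url", ref)]
    else if PySem.Str.isIn "advisory" ref || PySem.Str.isIn "advisories" ref ||
            PySem.Str.isIn "www.debian.org/security/" ref then
      [("type", "ADVISORY"), ("url", ref)]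
    else if PySem.Str.isIn "arxiv.org" ref then
      [("type", "ARTICLE"), ("url", ref)]
    else
      [("type", "WEB"), ("url", ref)] : List (String × String)) = pvPoint ref := by
  simp only [pvPoint, pvStage_pair, List.any_cons, List.any_nil, Bool.or_false, Bool.or_self]
  split_ifs <;> simp_all

theorem get_refs_foldl_gen (refs : List String)
    (acc : List (List (String × String))) :
    List.foldl (fun cve_refs ref =>
    if PySem.Str.isIn "commit/" ref || PySem.Str.isIn "commits/" ref then
      cve_refs ++ [[("type", "FIX"), ("url", ref)]]
    else if PySem.Str.isIn "issue" ref || PySem.Str.isIn "issues" ref || PySem.Str.isIn "show_bug" ref ||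
            PySem.Str.isIn "bugs.debian.org/" ref || PySem.Str.isIn "bugs.gentoo.org/" ref ||
            PySem.Str.isIn "syzkaller.appspot.com/bug?" ref || PySem.Str.isIn "savannah.gnu.org/bugs" ref ||
            PySem.Str.isIn "bugs.launchpad.net" ref || PySem.Str.isIn "hackerone.com/bugs" ref ||
            PySem.Str.isIn "hackerone.com/bugs" ref then
      cve_refs ++ [[("type", "REPORT"), ("url", ref)]]
    else if PySem.Str.isIn "advisory" ref || PySem.Str.isIn "advisories" ref ||
            PySem.Str.isIn "www.debian.org/security/" ref then
      cve_refs ++ [[("type", "ADVISORY"), ("url", ref)]]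
    else if PySem.Str.isIn "arxiv.org" ref then
      cve_refs ++ [[("type", "ARTICLE"), ("url", ref)]]
    else
      cve_refs ++ [[("type", "WEB"), ("url", ref)]]) acc refs = acc ++ refs.map pvPoint := by
  induction refs generalizing acc with
  | nil => simp
  | cons r t ih =>
    simp only [List.foldl]
    rw [ih]
    simp only [List.map_cons]
    rw [← get_refs_pointwise r]
    split_ifs <;> simp

-- ===== VERDICT (by name: the statement is the Claim_ definition above) =====
theorem get_refs_spec : Claim_equal_get_refs := by
  intro refs _
  unfold Spec_get_refs get_refs
  rw [get_refs_alt_eq_map]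
  simpa using get_refs_foldl_gen refs []
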